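-- pv_equiv track=rewrite | github.com/fy0/my-leetcode | 030.Substring with Concatenation of All Words/main2.py | loopMatch
-- ===== SOURCE A (Python) =====
-- def loopMatch(s, words, len2):
--     if len2 * len(words) > len(s):
--         return 0
--
--     my_words = words[:]
--     for i in words:
--         found = 0
--         sub = s[:len2]
--         for j in my_words:
--             if sub == j:
--                 s = s[len2:]
--                 my_words.remove(j)
--                 found = 1
--                 break
--         if not found:
--             return 0
--
--     return 1
-- ===== SOURCE B (Python) =====
-- def loopMatch(s, words, len2):
--     n = len(words)
--     if len2 * n > len(s):
--         return 0
--     need = {}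
--     for w in words:
--         need[w] = need.get(w, 0) + 1
--     for i in range(n):
--         chunk = s[i * len2:(i + 1) * len2]
--         c = need.get(chunk, 0)
--         if c == 0:
--             return 0
--         need[chunk] = c - 1
--     return 1
-- ===== Notes on version B (the rewrite author's own statement) =====
-- stated objective: alternative
-- what changed: A repeatedly re-slices the string and linearly scans-and-removes from a copy of words for each chunk; B builds a count dictionary of words once and walks the chunks of s by index, decrementing counts and failing on a missing or exhausted chunk.
import Mathlib
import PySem

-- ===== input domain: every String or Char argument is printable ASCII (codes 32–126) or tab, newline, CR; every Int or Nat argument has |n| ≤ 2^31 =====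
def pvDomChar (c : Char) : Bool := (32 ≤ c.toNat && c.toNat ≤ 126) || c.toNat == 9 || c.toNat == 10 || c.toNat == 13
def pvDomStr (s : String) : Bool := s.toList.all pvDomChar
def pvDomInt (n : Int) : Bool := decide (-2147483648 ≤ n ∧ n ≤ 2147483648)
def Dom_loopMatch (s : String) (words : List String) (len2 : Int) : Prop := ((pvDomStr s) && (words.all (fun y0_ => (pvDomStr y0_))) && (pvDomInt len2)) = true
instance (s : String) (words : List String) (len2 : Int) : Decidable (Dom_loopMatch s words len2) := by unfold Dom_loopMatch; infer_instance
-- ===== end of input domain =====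

-- B replaces A's scan-and-remove over a copy of `words` by a count dictionary of `words`
-- built once and an indexed walk over the chunks of s, decrementing counts (alternative algorithm).

-- ===== PORT A =====
-- inner `for j in my_words: if sub == j: ... my_words.remove(j); break`:
-- none = not found; some my' = my_words with the first element equal to sub removed
def loopMatchInner (sub : String) : List String → Option (List String)
  | [] => none
  | j :: rest => if sub = j then some rest else (loopMatchInner sub rest).map (j :: ·)

-- outer `for i in words:` with the loop-carried state (s, my_words)
def loopMatchOuter (len2 : Int) : List String → String → List String → Int
  | [], _, _ => 1
  | _ :: iw, s, my =>
    let sub := PySem.Str.slice s none (some len2)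
    match loopMatchInner sub my with
    | none => 0
    | some my' => loopMatchOuter len2 iw (PySem.Str.slice s (some len2) none) my'

def loopMatch (s : String) (words : List String) (len2 : Int) : Int :=
  if len2 * PySem.List.len words > PySem.Str.len s then 0
  else loopMatchOuter len2 words s words

-- ===== PORT B =====
-- `for i in range(n): chunk = s[i*len2:(i+1)*len2]; ...` with the counter `need` as state
def loopMatchAltGo (s : String) (len2 : Int) : List Int → PySem.Dict String Int → Int
  | [], _ => 1
  | i :: is, need =>
    let chunk := PySem.Str.slice s (some (i * len2)) (some ((i + 1) * len2))
    let c := need.getD chunk 0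
    if c = 0 then 0 else loopMatchAltGo s len2 is (need.insert chunk (c - 1))

def loopMatch_alt (s : String) (words : List String) (len2 : Int) : Int :=
  let n := PySem.List.len words
  if len2 * n > PySem.Str.len s then 0
  else loopMatchAltGo s len2 (PySem.List.pyRange 0 n 1)
        (words.foldl (fun d w => d.insert w (d.getD w 0 + 1)) PySem.Dict.empty)

-- ===== PRECONDITION & SPEC =====
def Spec_loopMatch (s : String) (words : List String) (len2 : Int) (out : Int) : Prop := out = loopMatch_alt s words len2
instance (s : String) (words : List String) (len2 : Int) (out : Int) : Decidable (Spec_loopMatch s words len2 out) := by unfold Spec_loopMatch; infer_instance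

-- ===== CLAIM (what is proved, stated in full; the proofs are below) =====
def Claim_equal_loopMatch : Prop := ∀ (s : String) (words : List String) (len2 : Int), Dom_loopMatch s words len2 → Spec_loopMatch s words len2 (loopMatch s words len2)

-- ===== LEMMAS AND PROOFS =====

-- A's string state after i iterations of `s = s[len2:]`
def pvIterDrop (len2 : Int) : Nat → List Char → List Char
  | 0, s => s
  | i+1, s => pvIterDrop len2 i (PySem.List.slice s (some len2) none)

lemma pvIterDrop_succ' (len2 : Int) (i : Nat) (s : List Char) :
    pvIterDrop len2 (i+1) s = PySem.List.slice (pvIterDrop len2 i s) (some len2) none := by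
  induction i generalizing s with
  | zero => rfl
  | succ j ih => exact ih (PySem.List.slice s (some len2) none)

lemma pvClampIdx_mono_neg (n : Nat) {a b : Int} (h : a ≤ b) (hb : b < 0) :
    PySem.List.clampIdx n a ≤ PySem.List.clampIdx n b := by
  have ha : a < 0 := lt_of_le_of_lt h hb
  simp only [PySem.List.clampIdx, if_pos ha, if_pos hb]
  split_ifs <;> omega

lemma pvIterDrop_nonneg (k : Nat) (i : Nat) (s : List Char) :
    pvIterDrop (k : Int) i s = s.drop (i * k) := by
  induction i generalizing s with
  | zero => simp [pvIterDrop]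
  | succ j ih =>
    rw [pvIterDrop, ih, PySem.List.slice_from_natCast, List.drop_drop]
    congr 1; ring

lemma pvIterDrop_len_le {len2 : Int} {k : Nat} (hk : len2 = -(k : Int)) (hkpos : 0 < k)
    (j : Nat) (s : List Char) : (pvIterDrop len2 (j+1) s).length ≤ k := by
  induction j generalizing s with
  | zero =>
    have hclamp : PySem.List.clampIdx s.length len2 = s.length - k := by
      rw [hk]; exact PySem.List.clampIdx_neg_natCast s.length k hkpos
    rw [pvIterDrop, pvIterDrop, PySem.List.slice_some_none, hclamp, List.length_drop]
    omega
  | succ j ih => rw [pvIterDrop]; exact ih _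

-- the chunk A compares at step i equals B's chunk s0[i*len2:(i+1)*len2]
lemma pvChunk_eq (len2 : Int) (s0 : List Char) (i : Nat) :
    PySem.List.slice (pvIterDrop len2 i s0) none (some len2)
    = PySem.List.slice s0 (some ((i : Int) * len2)) (some (((i : Int) + 1) * len2)) := by
  by_cases hpos : 0 ≤ len2
  · obtain ⟨k, rfl⟩ := Int.eq_ofNat_of_zero_le hpos
    rw [pvIterDrop_nonneg, PySem.List.slice_to_natCast]
    have h1 : (i : Int) * (k : Int) = ((i * k : Nat) : Int) := by push_cast; ring
    have h2 : ((i : Int) + 1) * (k : Int) = (((i + 1) * k : Nat) : Int) := by push_cast; ring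
    rw [h1, h2, PySem.List.slice_natCast]
    congr 1
    simp [Nat.add_mul]
  · have hneg : len2 < 0 := by omega
    have hk : len2 = -(((-len2).toNat : Nat) : Int) := by omega
    have hkpos : 0 < (-len2).toNat := by omega
    cases i with
    | zero => simp [pvIterDrop]
    | succ j =>
      have hlen : (pvIterDrop len2 (j+1) s0).length ≤ (-len2).toNat :=
        pvIterDrop_len_le hk hkpos j s0
      have hiter : pvIterDrop (-(((-len2).toNat : Nat) : Int)) (j+1) s0
          = pvIterDrop len2 (j+1) s0 := by rw [← hk]
      conv_lhs => rw [hk]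
      rw [PySem.List.slice_to_neg_natCast _ _ hkpos, hiter]
      have hL : (pvIterDrop len2 (j+1) s0).length - (-len2).toNat = 0 := by omega
      rw [hL, List.take_zero]
      symm
      apply List.eq_nil_of_length_eq_zero
      rw [PySem.List.length_slice]
      have hstart : (((j+1 : Nat)) : Int) * len2 < 0 :=
        mul_neg_of_pos_of_neg (by exact_mod_cast Nat.succ_pos j) hneg
      have hba' : ((((j+1 : Nat)) : Int) + 1) * len2 ≤ (((j+1 : Nat)) : Int) * len2 := by
        calc ((((j+1 : Nat)) : Int) + 1) * len2 = (((j+1 : Nat)) : Int) * len2 + len2 := by ring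
        _ ≤ (((j+1 : Nat)) : Int) * len2 := by linarith
      have hmono := pvClampIdx_mono_neg s0.length hba' hstart
      omega

-- inner loop: not found ↔ count is 0
lemma pvInner_none_iff (sub : String) (my : List String) :
    loopMatchInner sub my = none ↔ List.count sub my = 0 := by
  induction my with
  | nil => simp [loopMatchInner]
  | cons j rest ih =>
    by_cases h : sub = j
    · subst h; simp [loopMatchInner]
    · rw [loopMatchInner, if_neg h]
      rw [List.count_cons]
      simp only [beq_iff_eq, if_neg (Ne.symm h), Nat.add_zero, ← ih]
      cases loopMatchInner sub rest <;> simp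

-- inner loop: the removal decrements exactly the count of sub
lemma pvInner_some_count {sub : String} {my my' : List String}
    (h : loopMatchInner sub my = some my') (x : String) :
    (List.count x my' : Int) = (List.count x my : Int) - (if x = sub then 1 else 0) := by
  induction my generalizing my' with
  | nil => simp [loopMatchInner] at h
  | cons j rest ih =>
    have hcc : ∀ (l : List String), (List.count x (j :: l) : Int)
        = (List.count x l : Int) + (if x = j then 1 else 0) := by
      intro l
      by_cases hx : x = j
      · simp [hx]
      · have hx' : ¬ (j = x) := fun hh => hx hh.symm
        simp [hx, hx']
    by_cases hj : sub = j
    · rw [loopMatchInner, if_pos hj] at h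
      obtain rfl : rest = my' := Option.some.inj h
      rw [hcc]
      subst hj
      by_cases hx : x = sub <;> simp [hx]
    · rw [loopMatchInner, if_neg hj] at h
      cases hr : loopMatchInner sub rest with
      | none => rw [hr] at h; simp at h
      | some r' =>
        rw [hr] at h
        obtain rfl : j :: r' = my' := Option.some.inj h
        rw [hcc, hcc, ih hr]
        ring

-- main invariant: A's outer loop at step i with multiset `my` = B's indexed walk with a
-- counter d representing `my`
lemma pvMain (len2 : Int) (s0 : String) (iter : List String) :
    ∀ (i : Nat) (my : List String) (d : PySem.Dict String Int) (s : String),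
    s.toList = pvIterDrop len2 i s0.toList →
    (∀ x, d.getD x 0 = (List.count x my : Int)) →
    loopMatchOuter len2 iter s my
      = loopMatchAltGo s0 len2 ((List.range' i iter.length).map (fun k => ((k : Nat) : Int))) d := by
  induction iter with
  | nil => intro i my d s _ _; simp [loopMatchOuter, loopMatchAltGo]
  | cons w iw ih =>
    intro i my d s hs hinv
    have hchunk : PySem.Str.slice s none (some len2)
        = PySem.Str.slice s0 (some ((i : Int) * len2)) (some (((i : Int) + 1) * len2)) := by
      apply String.toList_inj.mp
      rw [PySem.Str.toList_slice, PySem.Str.toList_slice,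
          PySem.Chars.slice_eq_listSlice, PySem.Chars.slice_eq_listSlice, hs]
      exact pvChunk_eq len2 s0.toList i
    rw [show (List.range' i (w :: iw).length) = i :: List.range' (i+1) iw.length from rfl]
    simp only [List.map_cons]
    rw [loopMatchOuter, loopMatchAltGo]
    simp only [hchunk]
    cases hfind : loopMatchInner (PySem.Str.slice s0 (some ((i : Int) * len2)) (some (((i : Int) + 1) * len2))) my with
    | none =>
      have hc : d.getD (PySem.Str.slice s0 (some ((i : Int) * len2)) (some (((i : Int) + 1) * len2))) 0 = 0 := by
        rw [hinv, (pvInner_none_iff _ _).mp hfind]; rfl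
      simp [hc]
    | some my' =>
      have hcnt : List.count (PySem.Str.slice s0 (some ((i : Int) * len2)) (some (((i : Int) + 1) * len2))) my ≠ 0 := by
        intro h0
        rw [(pvInner_none_iff _ _).mpr h0] at hfind
        simp at hfind
      have hc : d.getD (PySem.Str.slice s0 (some ((i : Int) * len2)) (some (((i : Int) + 1) * len2))) 0 ≠ 0 := by
        rw [hinv]; exact_mod_cast hcnt
      simp only [hc]
      apply ih (i+1)
      · rw [PySem.Str.toList_slice, PySem.Chars.slice_eq_listSlice, hs]
        exact (pvIterDrop_succ' len2 i s0.toList).symm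
      · intro x
        rw [PySem.Dict.getD_insert, pvInner_some_count hfind x]
        by_cases hx : x = PySem.Str.slice s0 (some ((i : Int) * len2)) (some (((i : Int) + 1) * len2))
        · simp [hx, hinv]
        · simp [hx, hinv]

-- ===== VERDICT (by name: the statement is the Claim_ definition above) =====
theorem loopMatch_spec : Claim_equal_loopMatch := by
  intro s words len2 _
  unfold Spec_loopMatch loopMatch loopMatch_alt
  dsimp only
  by_cases hg : len2 * PySem.List.len words > PySem.Str.len s
  · rw [if_pos hg, if_pos hg]
  · rw [if_neg hg, if_neg hg]
    rw [PySem.Dict.foldl_insert_getD_add_one_eq_counter]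
    have hr : PySem.List.pyRange 0 (PySem.List.len words) 1
        = (List.range' 0 words.length).map (fun k => ((k : Nat) : Int)) := by
      rw [PySem.List.len_eq, PySem.List.pyRange_zero_natCast, List.range_eq_range']
    rw [hr]
    exact pvMain len2 s words 0 words _ s rfl (fun x => PySem.Dict.getD_counter words x)
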